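-- pv_equiv track=rewrite | github.com/jjiwoning/Code_Test | python_algo/Programmers/Rotate_parentheses.py | solution
-- ===== SOURCE A (Python) =====
-- from collections import deque
--
-- def solution(s):
--     answer = 0
--     q = deque()
--     for i in s:
--         q.append(i)
--
--     for i in range(len(s)):
--         if i > 0:
--             a = q.popleft()
--             q.append(a)
--
--         stack = []
--         check = True
--
--         for i in q:
--             if i == "[":
--                 stack.append(i)
--             if i == "{":
--                 stack.append(i)
--             if i == "(":
--                 stack.append(i)
--
--             if i in "]})":
--                 if not stack:
--                     check = False
--                     break
--
--             if i == "]":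
--                 if stack[-1] == "[":
--                     stack.pop()
--                 else:
--                     break
--             if i == "}":
--                 if stack[-1] == "{":
--                     stack.pop()
--                 else:
--                     break
--             if i == ")":
--                 if stack[-1] == "(":
--                     stack.pop()
--                 else:
--                     break
--
--         if not stack and check:
--             answer += 1
--
--
--     return answer
-- ===== SOURCE B (Python) =====
-- def solution(s):
--     answer = 0
--     n = len(s)
--     for i in range(n):
--         rotated = s[i:] + s[:i]
--         t = ''.join(c for c in rotated if c in '()[]{}')
--         while True:
--             u = t.replace('()', '').replace('[]', '').replace('{}', '')
--             if len(u) == len(t):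
--                 break
--             t = u
--         if t == '':
--             answer += 1
--     return answer
-- ===== Notes on version B (the rewrite author's own statement) =====
-- stated objective: alternative
-- what changed: The stack automaton with break flags is replaced by adjacent-pair elimination: each rotation (built by slicing instead of deque popleft/append) is filtered to its bracket characters, then adjacent matching bracket pairs are repeatedly deleted via str.replace until the string stops shrinking, and the rotation is counted iff the residue is empty.
import Mathlib
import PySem

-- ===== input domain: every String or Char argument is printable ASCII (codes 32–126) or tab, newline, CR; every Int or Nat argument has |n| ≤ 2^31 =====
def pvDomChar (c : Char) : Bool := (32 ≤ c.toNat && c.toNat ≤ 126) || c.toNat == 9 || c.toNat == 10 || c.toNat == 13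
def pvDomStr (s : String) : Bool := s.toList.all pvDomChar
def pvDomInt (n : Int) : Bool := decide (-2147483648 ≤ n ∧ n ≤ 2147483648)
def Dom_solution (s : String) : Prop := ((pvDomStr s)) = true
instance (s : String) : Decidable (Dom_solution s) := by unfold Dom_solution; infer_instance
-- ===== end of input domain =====

-- B replaces A's stack-based validity check by repeated adjacent-pair elimination
-- (filter to brackets, then delete '()','[]','{}' via replace until the string stops
-- shrinking) and builds each rotation by slicing instead of deque popleft/append;
-- objective: alternative algorithm, not claimed faster.

-- ===== PORT A =====
-- A's deque rotation `a = q.popleft(); q.append(a)` (q nonempty whenever A runs it,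
-- since the loop body only reaches it when len(s) > 0).
def rotOnce (q : List Char) : List Char :=
  match q with
  | [] => []
  | a :: t => t ++ [a]

-- A's inner `for i in q` loop with its break/check flags; the Lean list `stack` holds
-- Python's stack reversed (head = Python's stack[-1], append = cons, pop = tail).
def checkA : List Char → List Char → Bool → (List Char × Bool)
  | [], stack, check => (stack, check)
  | c :: rest, stack, check =>
    let stack := if c = '[' then c :: stack else stack
    let stack := if c = '{' then c :: stack else stack
    let stack := if c = '(' then c :: stack else stack
    if c = ']' ∨ c = '}' ∨ c = ')' then
      match stack with
      | [] => (stack, false)                    -- check = False; break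
      | top :: rest' =>
        if c = ']' then
          (if top = '[' then checkA rest rest' check else (top :: rest', check))  -- else: break
        else if c = '}' then
          (if top = '{' then checkA rest rest' check else (top :: rest', check))
        else
          (if top = '(' then checkA rest rest' check else (top :: rest', check))
    else
      checkA rest stack check

def solution (s : String) : Int :=
  let q := s.toList
  ((PySem.List.pyRange 0 (q.length : Int)).foldl
    (fun (st : List Char × Int) (i : Int) =>
      let q := if i > 0 then rotOnce st.1 else st.1
      let r := checkA q [] true
      (q, if r.1 = [] ∧ r.2 = true then st.2 + 1 else st.2))
    (q, 0)).2

-- ===== PORT B =====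
-- `c in '()[]{}'`
def isBr (c : Char) : Bool :=
  c == '(' || c == ')' || c == '[' || c == ']' || c == '{' || c == '}'

-- t.replace('()','').replace('[]','').replace('{}','')
def replace3 (t : List Char) : List Char :=
  PySem.Chars.replace (PySem.Chars.replace (PySem.Chars.replace t ['(', ')'] []) ['[', ']'] []) ['{', '}'] []

-- the `while True: … if len(u) == len(t): break` loop
def reduceLoop (t : List Char) : List Char :=
  let u := replace3 t
  if h : u.length < t.length then reduceLoop u else t
termination_by t.length
decreasing_by exact h

def solution_alt (s : String) : Int :=
  let cs := s.toList
  (PySem.List.pyRange 0 (cs.length : Int)).foldl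
    (fun (answer : Int) (i : Int) =>
      let rotated := PySem.List.slice cs (some i) none ++ PySem.List.slice cs none (some i)
      let t := rotated.filter isBr
      let t := reduceLoop t
      if t = [] then answer + 1 else answer)
    0

-- ===== PRECONDITION & SPEC =====
def Spec_solution (s : String) (out : Int) : Prop := out = solution_alt s
instance (s : String) (out : Int) : Decidable (Spec_solution s out) := by unfold Spec_solution; infer_instance

-- ===== CLAIM (what is proved, stated in full; the proofs are below) =====
def Claim_equal_solution : Prop := ∀ (s : String), Dom_solution s → Spec_solution s (solution s)

-- ===== LEMMAS AND PROOFS =====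

-- Reference bracket machine: one step of a stack automaton over Option (none = failed).
def pairM (o c : Char) : Bool :=
  (o == '(' && c == ')') || (o == '[' && c == ']') || (o == '{' && c == '}')

def mstep : Option (List Char) → Char → Option (List Char)
  | none, _ => none
  | some st, c =>
    if c = '(' ∨ c = '[' ∨ c = '{' then some (c :: st)
    else if c = ')' ∨ c = ']' ∨ c = '}' then
      match st with
      | [] => none
      | o :: r => if pairM o c then some r else none
    else some st

theorem mfold_none (t : List Char) : t.foldl mstep none = none := by
  induction t with
  | nil => rfl
  | cons c rest ih => simpa [mstep] using ih

-- A's check succeeds (empty stack, check still True) iff the machine run ends with empty stack.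
theorem checkA_iff (t : List Char) (st : List Char) :
    (checkA t st true = ([], true)) ↔ t.foldl mstep (some st) = some [] := by
  induction t generalizing st with
  | nil => simp [checkA, List.foldl]
  | cons c rest ih =>
    by_cases h1 : c = '(' <;> by_cases h2 : c = '[' <;> by_cases h3 : c = '{' <;>
      by_cases h4 : c = ')' <;> by_cases h5 : c = ']' <;> by_cases h6 : c = '}' <;>
      simp_all [checkA, mstep, List.foldl]
    -- remaining goals: closing-bracket cases
    all_goals
      cases st with
      | nil => simp [mfold_none]
      | cons o r =>
        by_cases hm : pairM o c = true <;>
          simp_all [pairM, mfold_none]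

-- Non-bracket characters are no-ops for the machine.
theorem mfold_filter (t : List Char) (s : Option (List Char)) :
    (t.filter isBr).foldl mstep s = t.foldl mstep s := by
  induction t generalizing s with
  | nil => rfl
  | cons c rest ih =>
    by_cases hb : isBr c = true
    · simp [List.filter, hb, List.foldl, ih]
    · have : mstep s c = s := by
        cases s with
        | none => rfl
        | some st => simp_all [mstep, isBr]
      simp [List.filter, hb, List.foldl, this, ih]

-- `t.replace(old, '')` for a two-character old, as a structural recursion.
def rep2 (o c : Char) : List Char → List Char
  | [] => []
  | [x] => [x]
  | x :: y :: t => if x = o ∧ y = c then rep2 o c t else x :: rep2 o c (y :: t)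

theorem replace_go_eq (o c : Char) (fuel : Nat) (l acc : List Char)
    (h : l.length ≤ fuel) :
    PySem.Chars.replace.go [o, c] [] fuel l acc = acc.reverse ++ rep2 o c l := by
  induction fuel generalizing l acc with
  | zero =>
    have : l = [] := by cases l <;> simp_all
    subst this; simp [PySem.Chars.replace.go, rep2]
  | succ fuel ih =>
    match l with
    | [] => simp [PySem.Chars.replace.go, rep2]
    | [x] =>
      have hpre : [o, c].isPrefixOf [x] = false := by
        simp [List.isPrefixOf]
      simp [PySem.Chars.replace.go, hpre, rep2]
      rw [ih [] (x :: acc) (by simp)]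
      simp [rep2]
    | x :: y :: t =>
      by_cases hxy : x = o ∧ y = c
      · obtain ⟨hx, hy⟩ := hxy
        subst hx; subst hy
        have hpre : [x, y].isPrefixOf (x :: y :: t) = true := by
          simp [List.isPrefixOf]
        simp only [PySem.Chars.replace.go, hpre, if_pos]
        rw [show List.drop [x, y].length (x :: y :: t) = t from by simp]
        rw [ih t ([].reverse ++ acc) (by simp at h; omega)]
        simp [rep2]
      · have hpre : [o, c].isPrefixOf (x :: y :: t) = false := by
          simp [List.isPrefixOf]
          intro hx hy; exact hxy ⟨hx.symm, hy.symm⟩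
        simp only [PySem.Chars.replace.go, hpre, Bool.false_eq_true, if_false]
        rw [ih (y :: t) (x :: acc) (by simp at h ⊢; omega)]
        simp [rep2, hxy]

theorem replace_eq_rep2 (o c : Char) (t : List Char) :
    PySem.Chars.replace t [o, c] [] = rep2 o c t := by
  simp only [PySem.Chars.replace]
  rw [if_neg (by simp)]
  simpa using replace_go_eq o c t.length t [] (le_refl _)

theorem length_rep2_le (o c : Char) (t : List Char) : (rep2 o c t).length ≤ t.length := by
  fun_induction rep2 o c t with
  | case1 => simp
  | case2 => simp
  | case3 x y t hxy ih => simp [hxy]; omega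
  | case4 x y t hxy ih => simp_all

theorem rep2_eq_of_length (o c : Char) (t : List Char)
    (h : (rep2 o c t).length = t.length) : rep2 o c t = t := by
  fun_induction rep2 o c t with
  | case1 => rfl
  | case2 => rfl
  | case3 x y t hxy ih =>
    exfalso
    have := length_rep2_le o c t
    simp [hxy] at h
    omega
  | case4 x y t hxy ih =>
    simp [hxy] at h ⊢
    exact ih h

theorem rep2_all (o c : Char) (p : Char → Bool) (t : List Char)
    (h : t.all p) : (rep2 o c t).all p := by
  fun_induction rep2 o c t with
  | case1 => simp
  | case2 => simp_all
  | case3 x y t hxy ih => simp_all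
  | case4 x y t hxy ih => simp_all

-- Deleting an adjacent matched pair does not change the machine run.
theorem mfold_rep2 (o c : Char)
    (hp : (o = '(' ∧ c = ')') ∨ (o = '[' ∧ c = ']') ∨ (o = '{' ∧ c = '}'))
    (t : List Char) (s : Option (List Char)) :
    (rep2 o c t).foldl mstep s = t.foldl mstep s := by
  fun_induction rep2 o c t generalizing s with
  | case1 => rfl
  | case2 => rfl
  | case3 x y t hxy ih =>
    have hxe : x = o := hxy.1
    have hye : y = c := hxy.2
    have hstep : mstep (mstep s x) y = s := by
      subst hxe; subst hye
      cases s with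
      | none => rfl
      | some st => rcases hp with ⟨ho, hc⟩ | ⟨ho, hc⟩ | ⟨ho, hc⟩ <;> subst ho <;> subst hc <;>
          simp [mstep, pairM]
    rw [ih s]
    simp only [List.foldl, hstep]
  | case4 x y t hxy ih =>
    simp only [List.foldl, ih]

theorem mfold_replace3 (t : List Char) (s : Option (List Char)) :
    (replace3 t).foldl mstep s = t.foldl mstep s := by
  simp only [replace3, replace_eq_rep2]
  rw [mfold_rep2 '{' '}' (by simp) _ s, mfold_rep2 '[' ']' (by simp) _ s,
      mfold_rep2 '(' ')' (by simp) _ s]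

theorem mfold_reduceLoop (t : List Char) (s : Option (List Char)) :
    (reduceLoop t).foldl mstep s = t.foldl mstep s := by
  fun_induction reduceLoop t with
  | case1 t u h ih => rw [ih]; exact mfold_replace3 t s
  | case2 t u h => rfl

theorem replace3_all (p : Char → Bool) (t : List Char) (h : t.all p) :
    (replace3 t).all p := by
  simp only [replace3, replace_eq_rep2]
  exact rep2_all _ _ _ _ (rep2_all _ _ _ _ (rep2_all _ _ _ _ h))

theorem reduceLoop_all (p : Char → Bool) (t : List Char) (h : t.all p) :
    (reduceLoop t).all p := by
  fun_induction reduceLoop t with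
  | case1 t u hlt ih => exact ih (replace3_all p t h)
  | case2 t u hlt => exact h

-- The loop's result is a fixpoint of each of the three single-pair deletions.
def Fix3 (t : List Char) : Prop :=
  rep2 '(' ')' t = t ∧ rep2 '[' ']' t = t ∧ rep2 '{' '}' t = t

theorem reduceLoop_fix (t : List Char) : Fix3 (reduceLoop t) := by
  fun_induction reduceLoop t with
  | case1 t u hlt ih => exact ih
  | case2 t u hlt =>
    have hu : (u : List Char) = replace3 t := rfl
    have l1 := length_rep2_le '(' ')' t
    have l2 := length_rep2_le '[' ']' (rep2 '(' ')' t)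
    have l3 := length_rep2_le '{' '}' (rep2 '[' ']' (rep2 '(' ')' t))
    have hulen : u.length = t.length := by
      have : u.length ≤ t.length := by
        rw [hu]; simp only [replace3, replace_eq_rep2]; omega
      omega
    rw [hu] at hulen; simp only [replace3, replace_eq_rep2] at hulen
    have e1 : rep2 '(' ')' t = t := rep2_eq_of_length _ _ _ (by omega)
    rw [e1] at hulen l2 l3
    have e2 : rep2 '[' ']' t = t := rep2_eq_of_length _ _ _ (by omega)
    rw [e2] at hulen
    have e3 : rep2 '{' '}' t = t := rep2_eq_of_length _ _ _ (by omega)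
    exact ⟨e1, e2, e3⟩

def isOpenB (c : Char) : Bool := c == '(' || c == '[' || c == '{'

theorem rep2_fix_tail (o c x : Char) (t : List Char) (h : rep2 o c (x :: t) = x :: t) :
    rep2 o c t = t := by
  cases t with
  | nil => rfl
  | cons y t' =>
    by_cases hxy : x = o ∧ y = c
    · exfalso
      simp [rep2, hxy] at h
      have h1 := length_rep2_le o c t'
      have h2 := congrArg List.length h
      simp at h2
      omega
    · simpa [rep2, hxy] using h

theorem fix3_cons {x : Char} {t : List Char} (h : Fix3 (x :: t)) : Fix3 t :=
  ⟨rep2_fix_tail _ _ _ _ h.1, rep2_fix_tail _ _ _ _ h.2.1, rep2_fix_tail _ _ _ _ h.2.2⟩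

theorem rep2_cons_pair_ne (o c : Char) (t : List Char) :
    rep2 o c (o :: c :: t) ≠ o :: c :: t := by
  intro h
  rw [show rep2 o c (o :: c :: t) = rep2 o c t from by simp [rep2]] at h
  have h1 := length_rep2_le o c t
  have h2 := congrArg List.length h
  simp at h2
  omega

theorem fix3_no_head_pair {o y : Char} {t : List Char} (h : Fix3 (o :: y :: t))
    (hp : pairM o y = true) : False := by
  simp only [pairM, Bool.or_eq_true, Bool.and_eq_true, beq_iff_eq] at hp
  rcases hp with (⟨ho, hy⟩ | ⟨ho, hy⟩) | ⟨ho, hy⟩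
  · subst ho; subst hy; exact rep2_cons_pair_ne _ _ _ h.1
  · subst ho; subst hy; exact rep2_cons_pair_ne _ _ _ h.2.1
  · subst ho; subst hy; exact rep2_cons_pair_ne _ _ _ h.2.2

-- A bracket string with no adjacent matched pair is accepted by the machine only if empty.
theorem noredex_empty (t : List Char) (st : List Char)
    (hall : t.all isBr) (hfix : Fix3 t)
    (hop : ∀ x ∈ st, isOpenB x = true)
    (hsafe : ∀ c' t', t = c' :: t' → ∀ o st', st = o :: st' → pairM o c' = false)
    (hrun : t.foldl mstep (some st) = some []) : t = [] ∧ st = [] := by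
  induction t generalizing st with
  | nil => simpa [List.foldl] using hrun
  | cons x t ih =>
    rw [List.all_cons, Bool.and_eq_true] at hall
    obtain ⟨hx, hallt⟩ := hall
    by_cases hxo : x = '(' ∨ x = '[' ∨ x = '{'
    · -- open: push
      have hstep : mstep (some st) x = some (x :: st) := by simp [mstep, hxo]
      rw [List.foldl_cons, hstep] at hrun
      have hop' : ∀ y ∈ (x :: st), isOpenB y = true := by
        intro y hy
        rcases List.mem_cons.mp hy with h | h
        · subst h; simp [isOpenB]; rcases hxo with h|h|h <;> simp [h]
        · exact hop y h
      have hsafe' : ∀ c' t', t = c' :: t' → ∀ o st', (x :: st) = o :: st' → pairM o c' = false := by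
        intro c' t' ht o st' hst
        cases hst
        by_cases hp : pairM x c' = true
        · exfalso; subst ht; exact fix3_no_head_pair hfix hp
        · simp only [Bool.not_eq_true] at hp; exact hp
      have := ih (x :: st) hallt (fix3_cons hfix) hop' hsafe' hrun
      exact absurd this.2 (by simp)
    · -- close (by hall, x is a bracket)
      have hxc : x = ')' ∨ x = ']' ∨ x = '}' := by
        simp only [isBr, Bool.or_eq_true, beq_iff_eq] at hx
        rcases hx with ((((h|h)|h)|h)|h)|h
        · exact absurd (Or.inl h) hxo
        · exact Or.inl h
        · exact absurd (Or.inr (Or.inl h)) hxo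
        · exact Or.inr (Or.inl h)
        · exact absurd (Or.inr (Or.inr h)) hxo
        · exact Or.inr (Or.inr h)
      cases st with
      | nil =>
        have hstep : mstep (some []) x = none := by
          rcases hxc with h|h|h <;> subst h <;> simp [mstep]
        rw [List.foldl_cons, hstep, mfold_none] at hrun
        exact absurd hrun (by simp)
      | cons o st' =>
        have hpo : pairM o x = false := hsafe x t rfl o st' rfl
        have hstep : mstep (some (o :: st')) x = none := by
          rcases hxc with h|h|h <;> subst h <;> simp [mstep, hpo]
        rw [List.foldl_cons, hstep, mfold_none] at hrun
        exact absurd hrun (by simp)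

-- B's inner test agrees with the machine on bracket-only strings.
theorem reduceLoop_empty_iff (t : List Char) (hall : t.all isBr) :
    reduceLoop t = [] ↔ t.foldl mstep (some []) = some [] := by
  constructor
  · intro h
    have := mfold_reduceLoop t (some [])
    rw [h] at this
    simpa [List.foldl] using this.symm
  · intro h
    have hrun : (reduceLoop t).foldl mstep (some []) = some [] := by
      rw [mfold_reduceLoop]; exact h
    exact (noredex_empty (reduceLoop t) [] (reduceLoop_all _ _ hall) (reduceLoop_fix t)
      (by simp) (by intro c' t' _ o st' hst; cases hst) hrun).1

-- Per-rotation equivalence of the two validity tests.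
theorem valid_iff (q : List Char) :
    (checkA q [] true = ([], true)) ↔ reduceLoop (q.filter isBr) = [] := by
  rw [checkA_iff, reduceLoop_empty_iff _ (by simp [List.all_filter]), mfold_filter]

-- A's success condition, as tested in A's outer loop, matches B's test.
theorem cond_iff (q : List Char) :
    ((checkA q [] true).1 = [] ∧ (checkA q [] true).2 = true) ↔ reduceLoop (q.filter isBr) = [] := by
  constructor
  · intro hc
    exact (valid_iff q).mp (Prod.ext_iff.mpr ⟨hc.1, hc.2⟩)
  · intro h
    have he := (valid_iff q).mpr h
    exact ⟨by rw [he], by rw [he]⟩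

theorem rotOnce_eq (q : List Char) : rotOnce q = q.rotate 1 := by
  cases q with
  | nil => rfl
  | cons a t => simp [rotOnce, List.rotate_cons_succ]

-- The outer-loop invariant: A's deque equals the rotation B builds by slicing,
-- and the two counters agree.
theorem loop_inv (cs : List Char) (k : Nat) (hk : k ≤ cs.length) :
    (List.range k).foldl
      (fun (st : List Char × Int) (j : Nat) =>
        let q := if (j : Int) > 0 then rotOnce st.1 else st.1
        let r := checkA q [] true
        (q, if r.1 = [] ∧ r.2 = true then st.2 + 1 else st.2))
      (cs, 0)
    = (cs.rotate (k - 1),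
       (List.range k).foldl
        (fun (answer : Int) (j : Nat) =>
          let rotated := PySem.List.slice cs (some (j : Int)) none ++ PySem.List.slice cs none (some (j : Int))
          let t := (rotated.filter isBr)
          let t := reduceLoop t
          if t = [] then answer + 1 else answer)
        0) := by
  induction k with
  | zero => simp [List.rotate_zero]
  | succ k ih =>
    have hk' : k ≤ cs.length := Nat.le_of_succ_le hk
    rw [List.range_succ, List.foldl_append, List.foldl_append, ih hk']
    simp only [List.foldl_cons, List.foldl_nil]
    have hq : (if (k : Int) > 0 then rotOnce (cs.rotate (k - 1)) else cs.rotate (k - 1))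
        = cs.rotate k := by
      by_cases h0 : k = 0
      · subst h0; simp
      · rw [if_pos (by exact_mod_cast Nat.pos_of_ne_zero h0), rotOnce_eq, List.rotate_rotate]
        congr 1; omega
    have hrot : PySem.List.slice cs (some (k : Int)) none ++ PySem.List.slice cs none (some (k : Int))
        = cs.rotate k := by
      rw [PySem.List.slice_from cs (by positivity), PySem.List.slice_to cs (by positivity)]
      rw [List.rotate_eq_drop_append_take (by simpa using Nat.le_of_succ_le hk)]
      simp
    rw [hq, hrot]
    congr 1
    exact if_congr (cond_iff (cs.rotate k)) rfl rfl

-- ===== VERDICT (by name: the statement is the Claim_ definition above) =====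
theorem solution_spec : Claim_equal_solution := by
  intro s _
  unfold Spec_solution solution solution_alt
  simp only [PySem.List.pyRange_zero_natCast, List.foldl_map]
  rw [loop_inv s.toList s.toList.length (le_refl _)]
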